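-- pv_equiv track=rewrite | github.com/hyong2016/hyong | tool.py | cryptData
-- ===== SOURCE A (Python) =====
-- def cryptData(data):
--     if(data==None or len(data)==0):
--         return None
--     dataLen=len(data)
--     if(dataLen>512):
--         dataLen=512
--     ret = ''
--     for i in range(dataLen):
--         value = ord(data[i])
--         if((value > 0x60) and (value < 0x7B)):
--             value = value - 0x20
--             value = 0x5A - value + 0x41
--         elif((value > 0x40) and (value < 0x5B)):
--             value = value + 0x20
--             value = 0x7A - value + 0x61
--         elif((value >= 0x30) and (value <= 0x34)):
--             value = value + 0x05
--         elif((value >= 0x35) and (value <= 0x39)):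
--             value = value - 0x05
--         ret += chr(value)
--     return ret
-- ===== SOURCE B (Python) =====
-- def _crypt(s):
--     # recursive: transform head, recurse on tail.
--     # Letters (either case): the cipher is swapcase composed with alphabet
--     # reversal, which collapses to the single involution code -> 0xBB - code
--     # (0xBB = ord('A') + ord('z') = ord('a') + ord('Z')).
--     # Digits: rotate by 5, i.e. (d + 5) mod 10.
--     if s == '':
--         return ''
--     o = ord(s[0])
--     if (0x41 <= o <= 0x5A) or (0x61 <= o <= 0x7A):
--         o = 0xBB - o
--     elif 0x30 <= o <= 0x39:
--         o = 0x30 + (o - 0x30 + 5) % 10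
--     return chr(o) + _crypt(s[1:])
--
-- def cryptData(data):
--     if not data:
--         return None
--     return _crypt(data[:512])
-- ===== Notes on version B (the rewrite author's own statement) =====
-- stated objective: simpler
-- what changed: B replaces A's index loop with a four-branch arithmetic cascade by a recursive head/tail decomposition using one collapsed involution formula per class: any letter maps to 0xBB - code (swapcase composed with alphabet reversal) and any digit to (d+5) mod 10, so A's four range branches and two-step adjustments become two closed-form expressions.
import Mathlib
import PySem

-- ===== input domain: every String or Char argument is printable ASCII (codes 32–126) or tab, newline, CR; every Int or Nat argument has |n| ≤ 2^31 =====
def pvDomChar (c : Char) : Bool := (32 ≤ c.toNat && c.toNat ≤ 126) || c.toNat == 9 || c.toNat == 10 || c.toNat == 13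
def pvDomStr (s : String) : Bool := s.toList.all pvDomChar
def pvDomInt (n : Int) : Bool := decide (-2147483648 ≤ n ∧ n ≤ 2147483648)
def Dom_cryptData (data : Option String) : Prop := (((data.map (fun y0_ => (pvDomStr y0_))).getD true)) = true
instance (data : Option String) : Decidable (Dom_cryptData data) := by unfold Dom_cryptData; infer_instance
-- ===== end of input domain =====

-- B replaces A's index loop with its four-branch if/elif cascade by a recursive
-- head/tail decomposition with one collapsed formula per class: letters -> 0xBB - code,
-- digits -> (d+5) mod 10 (objective: simpler).

-- ===== PORT A =====
-- A-side helper: the if/elif cascade of A's loop body on one code point (Python int arithmetic, exact)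
def cryptByte (value : Int) : Int :=
  if value > 0x60 ∧ value < 0x7B then 0x5A - (value - 0x20) + 0x41
  else if value > 0x40 ∧ value < 0x5B then 0x7A - (value + 0x20) + 0x61
  else if 0x30 ≤ value ∧ value ≤ 0x34 then value + 0x05
  else if 0x35 ≤ value ∧ value ≤ 0x39 then value - 0x05
  else value

def cryptData (data : Option String) : Option String :=
  match data with
  | none => none                                   -- data == None
  | some s =>
    if PySem.Str.len s = 0 then none               -- len(data) == 0
    else
      let dataLen : Int := PySem.Str.len s
      let dataLen : Int := if dataLen > 512 then 512 else dataLen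
      -- for i in range(dataLen): value = ord(data[i]); cascade; ret += chr(value)
      -- data[i] is always in range (i < dataLen ≤ len), so the pyGetD default is never used
      let ret : List Char := (PySem.List.pyRange 0 dataLen 1).foldl
        (fun ret i =>
          ret ++ [Char.ofNat (cryptByte ((PySem.List.pyGetD s.toList i ' ').toNat : Int)).toNat]) []
      some (String.ofList ret)

-- ===== PORT B =====
-- B-side helper: Source B's recursive _crypt over the characters (head transformed by the
-- two closed-form expressions, then recurse on the tail; Python's chained char-code
-- comparisons are code-point comparisons, written on c.toNat)
def cryptRec (s : List Char) : List Char :=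
  match s with
  | [] => []
  | c :: rest =>
    let o : Int := (c.toNat : Int)
    let o : Int :=
      if (0x41 ≤ o ∧ o ≤ 0x5A) ∨ (0x61 ≤ o ∧ o ≤ 0x7A) then 0xBB - o
      else if 0x30 ≤ o ∧ o ≤ 0x39 then 0x30 + PySem.Int.mod (o - 0x30 + 5) 10
      else o
    Char.ofNat o.toNat :: cryptRec rest

def cryptData_alt (data : Option String) : Option String :=
  match data with
  | none => none                                   -- not data (None)
  | some s =>
    if s.toList = [] then none                     -- not data (empty string)
    else some (String.ofList (cryptRec (PySem.List.slice s.toList none (some 512))))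

-- ===== PRECONDITION & SPEC =====
def Spec_cryptData (data : Option String) (out : Option String) : Prop := out = cryptData_alt data
instance (data : Option String) (out : Option String) : Decidable (Spec_cryptData data out) := by unfold Spec_cryptData; infer_instance

-- ===== CLAIM =====
def Claim_equal_cryptData : Prop := ∀ (data : Option String), Dom_cryptData data → Spec_cryptData data (cryptData data)

-- ===== LEMMAS AND PROOFS =====

-- B's recursion is a map over the list
theorem cryptRec_eq_map (s : List Char) :
    cryptRec s = s.map (fun c =>
      Char.ofNat (if (0x41 ≤ (c.toNat : Int) ∧ (c.toNat : Int) ≤ 0x5A) ∨ (0x61 ≤ (c.toNat : Int) ∧ (c.toNat : Int) ≤ 0x7A)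
          then (0xBB - (c.toNat : Int))
          else if 0x30 ≤ (c.toNat : Int) ∧ (c.toNat : Int) ≤ 0x39 then 0x30 + PySem.Int.mod ((c.toNat : Int) - 0x30 + 5) 10
          else (c.toNat : Int)).toNat) := by
  induction s with
  | nil => rfl
  | cons c rest ih => simp [cryptRec, ih]

-- per-character agreement: A's cascade equals B's closed-form expressions, for every Char
theorem cryptChar_eq (c : Char) :
    Char.ofNat (cryptByte ((c.toNat : Int))).toNat
      = Char.ofNat (if (0x41 ≤ (c.toNat : Int) ∧ (c.toNat : Int) ≤ 0x5A) ∨ (0x61 ≤ (c.toNat : Int) ∧ (c.toNat : Int) ≤ 0x7A)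
          then (0xBB - (c.toNat : Int))
          else if 0x30 ≤ (c.toNat : Int) ∧ (c.toNat : Int) ≤ 0x39 then 0x30 + PySem.Int.mod ((c.toNat : Int) - 0x30 + 5) 10
          else (c.toNat : Int)).toNat := by
  unfold cryptByte
  rw [PySem.Int.mod_eq_emod_of_pos (by norm_num)]
  congr 1
  split_ifs <;> omega

-- the main theorem
theorem cryptData_spec_aux (data : Option String) :
    cryptData data = cryptData_alt data := by
  cases data with
  | none => rfl
  | some s =>
    by_cases h : s.toList = []
    · simp [cryptData, cryptData_alt, h, PySem.Str.len]
    · have hlen : PySem.Str.len s = (s.toList.length : Int) := PySem.Str.len_eq s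
      have hlen0 : s.toList.length ≠ 0 := by simpa [List.length_eq_zero_iff] using h
      have hne : ¬ PySem.Str.len s = 0 := by rw [hlen]; exact_mod_cast hlen0
      simp only [cryptData, cryptData_alt, if_neg hne, if_neg h]
      congr 1
      congr 1
      rw [PySem.List.slice_to _ (by norm_num), cryptRec_eq_map]
      set f : Char → Char :=
        fun c => Char.ofNat (cryptByte ((c.toNat : Int))).toNat with hf
      set cs := s.toList with hcs
      have htake : (if PySem.Str.len s > 512 then 512 else PySem.Str.len s)
          = ((cs.take ((512:Int)).toNat).length : Int) := by
        rw [hlen, List.length_take]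
        split_ifs with h1 <;> simp <;> omega
      rw [htake]
      have hcongr : (PySem.List.pyRange 0 ((cs.take ((512:Int)).toNat).length : Int) 1).foldl
            (fun ret i => ret ++ [f (PySem.List.pyGetD cs i ' ')]) []
          = (PySem.List.pyRange 0 ((cs.take ((512:Int)).toNat).length : Int) 1).foldl
            (fun ret i => ret ++ [f (PySem.List.pyGetD (cs.take ((512:Int)).toNat) i ' ')]) [] := by
        apply PySem.List.foldl_congr_mem
        intro acc i hi
        rw [PySem.List.mem_pyRange_one] at hi
        have hilen : i < ((cs.take ((512:Int)).toNat).length : Int) := hi.2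
        rw [PySem.List.pyGetD_eq_getElem cs ' ' hi.1 (by
              rw [List.length_take] at hilen; push_cast at hilen ⊢; omega),
            PySem.List.pyGetD_eq_getElem _ ' ' hi.1 (by exact_mod_cast hilen)]
        rw [List.getElem_take]
      rw [hcongr, PySem.List.foldl_pyRange_zero_pyGetD' (cs.take ((512:Int)).toNat) ' '
            (fun ret c => ret ++ [f c]) [],
          PySem.List.foldl_append_singleton_eq_map]
      apply List.map_congr_left
      intro c _
      exact cryptChar_eq c

-- ===== VERDICT =====
theorem cryptData_spec : Claim_equal_cryptData := by
  intro data _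
  show cryptData data = cryptData_alt data
  exact cryptData_spec_aux data
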